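-- pv_equiv track=rewrite | github.com/adbcox/integrated-ai-platform | framework/execution_event_aggregation.py | aggregate_events_by_job
-- ===== SOURCE A (Python) =====
-- from typing import Any
--
-- def aggregate_events_by_job(events: list[dict[str, Any]]) -> dict[str, Any]:
--     if not events:
--         return {}
--     job_events = {}
--     for event in events:
--         if not isinstance(event, dict):
--             continue
--         job_id = event.get("job_id")
--         if not job_id:
--             continue
--         if job_id not in job_events:
--             job_events[job_id] = []
--         job_events[job_id].append(event)
--     return {job_id: job_events[job_id] for job_id in sorted(job_events.keys())}
-- ===== SOURCE B (Python) =====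
-- from itertools import groupby
--
--
-- def aggregate_events_by_job(events: list) -> dict:
--     key = lambda e: e.get("job_id")
--     qualifying = [e for e in events if isinstance(e, dict) and e.get("job_id")]
--     return {k: list(grp) for k, grp in groupby(sorted(qualifying, key=key), key=key)}
-- ===== Notes on version B (the rewrite author's own statement) =====
-- stated objective: alternative
-- what changed: Replaces A's dict-accumulate-then-sort-keys grouping with filter qualifying events, one stable sort on the job_id key and an itertools.groupby pass over consecutive equal keys.
import Mathlib
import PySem

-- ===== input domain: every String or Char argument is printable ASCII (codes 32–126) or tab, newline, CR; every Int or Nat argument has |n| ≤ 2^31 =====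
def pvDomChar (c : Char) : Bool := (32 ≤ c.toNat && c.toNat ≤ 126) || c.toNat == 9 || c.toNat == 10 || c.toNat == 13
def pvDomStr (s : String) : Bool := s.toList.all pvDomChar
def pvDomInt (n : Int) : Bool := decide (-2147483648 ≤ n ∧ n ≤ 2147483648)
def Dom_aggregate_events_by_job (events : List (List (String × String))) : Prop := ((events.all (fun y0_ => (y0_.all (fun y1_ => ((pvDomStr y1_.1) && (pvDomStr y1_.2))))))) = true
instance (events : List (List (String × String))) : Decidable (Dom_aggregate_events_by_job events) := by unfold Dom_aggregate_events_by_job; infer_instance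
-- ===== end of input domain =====

-- B replaces A's dict-accumulate-then-sort-keys grouping by filter, stable sort on the job_id key
-- and a single groupby-style pass over consecutive equal keys (objective: alternative decomposition).

-- shared helper: Python's event.get("job_id") (both A and B call it)
def getJobId (e : List (String × String)) : Option String := (PySem.Dict.mk e).get? "job_id"

-- ===== PORT A =====
-- `isinstance(event, dict)` is always true under the type convention (events is a list of dicts).
def aggregate_events_by_job (events : List (List (String × String))) : List (String × List (List (String × String))) :=
  if events = [] then []
  else
    let job_events : PySem.Dict String (List (List (String × String))) :=
      events.foldl (fun d event =>
        match getJobId event with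
        | none => d                                  -- "if not job_id: continue" (None case)
        | some jid =>
          if jid = "" then d                         -- "if not job_id: continue" (empty-string case)
          else
            let d1 := if d.contains jid then d else d.insert jid []   -- "if job_id not in job_events: job_events[job_id] = []"
            d1.insert jid (d1.getD jid [] ++ [event]))                -- "job_events[job_id].append(event)"
        PySem.Dict.empty
    -- {job_id: job_events[job_id] for job_id in sorted(job_events.keys())}; key always present, so getD is exact
    (PySem.List.sorted job_events.keys (fun k => k) false).map (fun jid => (jid, job_events.getD jid []))

-- ===== PORT B =====
-- truthiness test of e.get("job_id")
def evTruthy (e : List (String × String)) : Bool :=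
  match getJobId e with
  | none => false
  | some s => !(s == "")

-- key = lambda e: e.get("job_id"); on qualifying events the key is present, so getD "" is exact
def evKey (e : List (String × String)) : String := (getJobId e).getD ""

-- itertools.groupby over the sort key, each group collected into a list
def groupRuns : List (List (String × String)) → List (String × List (List (String × String)))
  | [] => []
  | e :: rest =>
    (evKey e, e :: rest.takeWhile (fun x => evKey x == evKey e)) ::
    groupRuns (rest.dropWhile (fun x => evKey x == evKey e))
termination_by l => l.length
decreasing_by
  exact Nat.lt_succ_of_le (List.length_dropWhile_le _ _)

def aggregate_events_by_job_alt (events : List (List (String × String))) : List (String × List (List (String × String))) :=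
  let qualifying := events.filter evTruthy
  groupRuns (PySem.List.sorted qualifying evKey false)

-- ===== PRECONDITION & SPEC =====
def Spec_aggregate_events_by_job (events : List (List (String × String))) (out : List (String × List (List (String × String)))) : Prop := out = aggregate_events_by_job_alt events
instance (events : List (List (String × String))) (out : List (String × List (List (String × String)))) : Decidable (Spec_aggregate_events_by_job events out) := by unfold Spec_aggregate_events_by_job; infer_instance

-- ===== CLAIM (what is proved, stated in full; the proofs are below) =====
def Claim_equal_aggregate_events_by_job : Prop := ∀ (events : List (List (String × String))), Dom_aggregate_events_by_job events → Spec_aggregate_events_by_job events (aggregate_events_by_job events)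

-- ===== LEMMAS AND PROOFS =====

-- abbreviations used only by the proofs
def pvQual (events : List (List (String × String))) : List (List (String × String)) :=
  events.filter evTruthy

def pvCanon (events : List (List (String × String))) : List (String × List (List (String × String))) :=
  (PySem.List.sorted (PySem.Set.ofList ((pvQual events).map evKey)) (fun k => k) false).map
    (fun k => (k, (pvQual events).filter (fun e => evKey e == k)))

-- the dict A builds, rewritten through Dict.modify
def pvDictA (events : List (List (String × String))) : PySem.Dict String (List (List (String × String))) :=
  events.foldl (fun d e => if evTruthy e then d.modify (evKey e) [] (· ++ [e]) else d) PySem.Dict.empty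

lemma pvFoldA_eq (events : List (List (String × String))) :
    events.foldl (fun d event =>
      match getJobId event with
      | none => d
      | some jid =>
        if jid = "" then d
        else
          let d1 := if d.contains jid then d else d.insert jid []
          d1.insert jid (d1.getD jid [] ++ [event]))
      PySem.Dict.empty = pvDictA events := by
  have hstep : ∀ (d : PySem.Dict String (List (List (String × String)))) (e : List (String × String)),
      (match getJobId e with
        | none => d
        | some jid =>
          if jid = "" then d
          else
            let d1 := if d.contains jid then d else d.insert jid []
            d1.insert jid (d1.getD jid [] ++ [e]))
      = if evTruthy e then d.modify (evKey e) [] (· ++ [e]) else d := by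
    intro d e
    cases h : getJobId e with
    | none => simp [evTruthy, h]
    | some jid =>
      by_cases hj : jid = ""
      · simp [evTruthy, h, hj]
      · simp only [evTruthy, evKey, h, hj, Option.getD_some]
        have : (!(jid == "")) = true := by simpa using hj
        rw [if_pos this]
        by_cases hc : d.contains jid
        · simp [hc, PySem.Dict.modify]
        · simp only [hc, Bool.false_eq_true, if_false, PySem.Dict.modify]
          rw [PySem.Dict.getD_insert_self, PySem.Dict.insert_insert_self,
              PySem.Dict.getD_of_not_contains _ _ (by simpa using hc)]
  exact congrArg (fun f => List.foldl f PySem.Dict.empty events)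
    (funext fun d => funext fun e => hstep d e)

lemma pvGetD_dictA (events : List (List (String × String))) (c : String) :
    (pvDictA events).getD c [] = (pvQual events).filter (fun e => evKey e == c) := by
  unfold pvDictA pvQual
  rw [PySem.List.foldl_if_eq_foldl_filter]
  have hmap : (events.filter evTruthy).foldl (fun d e => d.modify (evKey e) [] (· ++ [e])) PySem.Dict.empty
      = ((events.filter evTruthy).map (fun e => (evKey e, e))).foldl
          (fun d p => d.modify p.1 [] (· ++ [p.2])) PySem.Dict.empty := by
    rw [List.foldl_map]
  rw [hmap, PySem.Dict.getD_foldl_modify_append, PySem.Dict.getD_empty, List.nil_append,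
      List.filter_map, List.map_map]
  simp [Function.comp_def]

lemma pvKeys_dictA (events : List (List (String × String))) :
    (pvDictA events).keys = PySem.Set.ofList ((pvQual events).map evKey) := by
  unfold pvDictA pvQual
  rw [PySem.List.foldl_if_eq_foldl_filter, PySem.Dict.keys_foldl_modify_key,
      PySem.Dict.keys_empty, PySem.Set.update_nil_left]

lemma pvA_eq_canon (events : List (List (String × String))) :
    aggregate_events_by_job events = pvCanon events := by
  unfold aggregate_events_by_job pvCanon
  by_cases h : events = []
  · subst h
    simp [pvQual, PySem.Set.ofList_nil]
    exact (PySem.List.sorted_eq_nil_iff _ _ _).mpr rfl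
  · rw [if_neg h]
    simp only [pvFoldA_eq, pvKeys_dictA]
    exact List.map_congr_left (fun k _ => by rw [pvGetD_dictA])

-- stability of the sort with respect to the key
lemma pvInsertBy_filter (k : String) (x : List (String × String)) (ys : List (List (String × String)))
    (h : ys.Pairwise (fun a b => evKey a ≤ evKey b)) :
    (PySem.List.insertBy (fun a b => decide (evKey a < evKey b)) x ys).filter (fun e => evKey e == k)
      = if evKey x == k then ys.filter (fun e => evKey e == k) ++ [x]
        else ys.filter (fun e => evKey e == k) := by
  induction ys with
  | nil =>
    by_cases hx : evKey x == k <;> simp [PySem.List.insertBy, List.filter, hx]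
  | cons y ys ih =>
    have hpy : ys.Pairwise (fun a b => evKey a ≤ evKey b) := h.tail
    have hyz : ∀ z ∈ ys, evKey y ≤ evKey z := fun z hz => List.rel_of_pairwise_cons h hz
    rw [PySem.List.insertBy]
    by_cases hb : evKey x < evKey y
    · rw [if_pos (by simpa using hb)]
      by_cases hx : evKey x == k
      · -- key x = k and every element of y :: ys has key > k, so its filter is empty
        have hk : evKey x = k := by simpa using hx
        have hnone : (y :: ys).filter (fun e => evKey e == k) = [] := by
          rw [List.filter_eq_nil_iff]
          intro z hz
          have hzk : k < evKey z := by
            rcases List.mem_cons.mp hz with rfl | hz'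
            · exact hk ▸ hb
            · exact lt_of_lt_of_le (hk ▸ hb) (hyz z hz')
          simp
          intro hzek
          exact absurd hzek (by intro hh; exact absurd hh.symm (ne_of_lt hzk))
        rw [List.filter_cons, if_pos hx, hnone, if_pos hx]
        simp
      · rw [List.filter_cons, if_neg (by simpa using hx), if_neg (by simpa using hx)]
    · rw [if_neg (by simpa using hb)]
      rw [List.filter_cons, List.filter_cons, ih hpy]
      by_cases hx : evKey x == k <;> by_cases hy : evKey y == k <;>
        simp [hx, hy]

lemma pvSorted_filter_stable (xs : List (List (String × String))) (k : String) :
    (PySem.List.sorted xs evKey false).filter (fun e => evKey e == k)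
      = xs.filter (fun e => evKey e == k) := by
  have main : ∀ (xs acc : List (List (String × String))),
      acc.Pairwise (fun a b => evKey a ≤ evKey b) →
      ((xs.foldl (fun acc x => PySem.List.insertBy (fun a b => decide (evKey a < evKey b)) x acc) acc).filter
          (fun e => evKey e == k))
        = acc.filter (fun e => evKey e == k) ++ xs.filter (fun e => evKey e == k) := by
    intro xs
    induction xs with
    | nil => intro acc _; simp
    | cons x xs ih =>
      intro acc hacc
      rw [List.foldl_cons, ih _ (PySem.List.insertBy_pairwise_le evKey x acc hacc),
          pvInsertBy_filter k x acc hacc, List.filter_cons]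
      by_cases hx : evKey x == k <;> simp [hx]
  rw [PySem.List.sorted_eq_foldl_insertBy, main xs [] (by simp)]
  simp

-- Set.ofList facts
lemma pvOfList_sublist (xs : List String) : (PySem.Set.ofList xs).Sublist xs := by
  induction xs with
  | nil => simp [PySem.Set.ofList_nil]
  | cons x xs ih =>
    rw [PySem.Set.ofList_cons]
    have hd : ((PySem.Set.ofList xs).discard x).Sublist (PySem.Set.ofList xs) := by
      show (List.filter _ _).Sublist _
      exact List.filter_sublist
    exact List.Sublist.cons₂ x (hd.trans ih)

lemma pvOfList_filter_ne (xs : List String) (k0 : String) :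
    (PySem.Set.ofList xs).filter (fun y => !(y == k0)) = PySem.Set.ofList (xs.filter (fun y => !(y == k0))) := by
  induction xs with
  | nil => simp [PySem.Set.ofList_nil]
  | cons x xs ih =>
    have hdis : ∀ (S : PySem.Set String), S.discard x = S.filter (fun y => !(y == x)) := fun _ => rfl
    by_cases hx : x = k0
    · subst hx
      rw [PySem.Set.ofList_cons]
      have h1 : List.filter (fun y => !(y == x)) (x :: (PySem.Set.ofList xs).discard x)
          = List.filter (fun y => !(y == x)) ((PySem.Set.ofList xs).discard x) := by
        rw [List.filter_cons]; simp
      have h3 : List.filter (fun y => !(y == x)) (x :: xs) = xs.filter (fun y => !(y == x)) := by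
        rw [List.filter_cons]; simp
      rw [h1, hdis, List.filter_filter, h3, ← ih]
      exact List.filter_congr (fun a _ => by by_cases h : a = x <;> simp [h])
    · have hq : (!(x == k0)) = true := by simpa using hx
      have h1 : List.filter (fun y => !(y == k0)) (x :: (PySem.Set.ofList xs).discard x)
          = x :: List.filter (fun y => !(y == k0)) ((PySem.Set.ofList xs).discard x) := by
        rw [List.filter_cons, hq]; simp
      have h3 : List.filter (fun y => !(y == k0)) (x :: xs) = x :: xs.filter (fun y => !(y == k0)) := by
        rw [List.filter_cons, hq]; simp
      rw [PySem.Set.ofList_cons, h1, h3, PySem.Set.ofList_cons]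
      congr 1
      rw [hdis, hdis, ← ih, List.filter_filter, List.filter_filter]
      exact List.filter_congr (fun a _ => Bool.and_comm _ _)

-- groupby on a key-sorted list yields one group per distinct key, containing the key's filter
lemma pvGroupRuns_eq (l : List (List (String × String)))
    (h : l.Pairwise (fun a b => evKey a ≤ evKey b)) :
    groupRuns l = (PySem.Set.ofList (l.map evKey)).map (fun k => (k, l.filter (fun e => evKey e == k))) := by
  induction l using groupRuns.induct with
  | case1 => simp [groupRuns, PySem.Set.ofList_nil]
  | case2 e rest ih =>
    have hpe := h
    set pe : List (String × String) → Bool := fun x => evKey x == evKey e with hpedef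
    set t := rest.takeWhile pe with htdef
    set d := rest.dropWhile pe with hddef
    have htd : t ++ d = rest := List.takeWhile_append_dropWhile
    have ht : ∀ x ∈ t, evKey x = evKey e := by
      intro x hx
      have := List.mem_takeWhile_imp hx
      simpa [hpedef] using this
    have hrest : ∀ x ∈ rest, evKey e ≤ evKey x := fun x hx => List.rel_of_pairwise_cons h hx
    have hdpw : d.Pairwise (fun a b => evKey a ≤ evKey b) :=
      List.Pairwise.sublist (hddef ▸ List.dropWhile_sublist pe) h.tail
    have hd0 : ∀ x ∈ d, evKey e < evKey x := by
      cases hdc : d with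
      | nil => simp
      | cons h0 d' =>
        have hph0 : pe h0 = false := by
          have := List.head?_dropWhile_not pe rest
          rw [← hddef, hdc] at this
          simpa using this
        have hh0r : h0 ∈ rest :=
          List.Sublist.mem (by simp [hdc]) (hddef ▸ List.dropWhile_sublist pe)
        have hne : evKey h0 ≠ evKey e := by simpa [hpedef] using hph0
        have hk0h0 : evKey e < evKey h0 := lt_of_le_of_ne (hrest h0 hh0r) (Ne.symm hne)
        intro x hx
        rcases List.mem_cons.mp hx with rfl | hx'
        · exact hk0h0
        · have hp' : List.Pairwise (fun a b => evKey a ≤ evKey b) (h0 :: d') := hdc ▸ hdpw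
          exact hk0h0.trans_le (List.rel_of_pairwise_cons hp' hx')
    -- unfold one step of groupRuns
    rw [groupRuns]
    -- rewrite the distinct sorted keys
    have hmap : (e :: rest).map evKey = evKey e :: (t.map evKey ++ d.map evKey) := by
      rw [← htd]; simp
    have htf : (t.map evKey).filter (fun y => !(y == evKey e)) = [] := by
      rw [List.filter_eq_nil_iff]
      intro y hy
      rcases List.mem_map.mp hy with ⟨x, hx, rfl⟩
      simp [ht x hx]
    have hdf : (d.map evKey).filter (fun y => !(y == evKey e)) = d.map evKey := by
      rw [List.filter_eq_self]
      intro y hy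
      rcases List.mem_map.mp hy with ⟨x, hx, rfl⟩
      simp [ne_of_gt (hd0 x hx)]
    have hkeys : PySem.Set.ofList ((e :: rest).map evKey) = evKey e :: PySem.Set.ofList (d.map evKey) := by
      rw [hmap, PySem.Set.ofList_cons]
      congr 1
      show ((PySem.Set.ofList _).filter (fun y => !(y == evKey e))) = _
      rw [pvOfList_filter_ne, List.filter_append, htf, hdf, List.nil_append]
    rw [hkeys, List.map_cons]
    -- head group
    have hhead : (e :: rest).filter (fun x => evKey x == evKey e) = e :: t := by
      rw [List.filter_cons, if_pos (by simp), ← htd, List.filter_append]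
      rw [List.filter_eq_self.mpr (fun x hx => by simp [ht x hx]),
          List.filter_eq_nil_iff.mpr (fun x hx => by simp [ne_of_gt (hd0 x hx)])]
      simp
    -- tail groups
    have htail : groupRuns d
        = (PySem.Set.ofList (d.map evKey)).map (fun k => (k, (e :: rest).filter (fun x => evKey x == k))) := by
      rw [ih hdpw]
      refine List.map_congr_left (fun k hk => ?_)
      have hkd : k ∈ d.map evKey := by
        exact (PySem.Set.mem_ofList _ _).mp hk
      rcases List.mem_map.mp hkd with ⟨x0, hx0, rfl⟩
      have hkgt : evKey e < evKey x0 := hd0 x0 hx0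
      have hfe : (e :: rest).filter (fun x => evKey x == evKey x0) = d.filter (fun x => evKey x == evKey x0) := by
        rw [List.filter_cons, if_neg (by simp [ne_of_lt hkgt]), ← htd, List.filter_append]
        rw [List.filter_eq_nil_iff.mpr (fun x hx => by simp [ht x hx, ne_of_lt hkgt])]
        simp
      rw [hfe]
    rw [htail, hhead]

lemma pvB_eq_canon (events : List (List (String × String))) :
    aggregate_events_by_job_alt events = pvCanon events := by
  unfold aggregate_events_by_job_alt pvCanon pvQual
  have hSp : (PySem.List.sorted (events.filter evTruthy) evKey false).Pairwise
      (fun a b => evKey a ≤ evKey b) := PySem.List.sorted_pairwise _ evKey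
  rw [pvGroupRuns_eq _ hSp]
  have hkeys : PySem.List.sorted (PySem.Set.ofList ((events.filter evTruthy).map evKey)) (fun k => k) false
      = PySem.Set.ofList ((PySem.List.sorted (events.filter evTruthy) evKey false).map evKey) := by
    apply PySem.List.sorted_id_eq_of_perm_of_pairwise
    · refine (List.perm_ext_iff_of_nodup (PySem.Set.nodup_ofList _) (PySem.Set.nodup_ofList _)).mpr ?_
      intro a
      rw [PySem.Set.mem_ofList, PySem.Set.mem_ofList]
      exact ((PySem.List.sorted_perm (events.filter evTruthy) evKey false).map evKey).mem_iff
    · exact List.Pairwise.sublist (pvOfList_sublist _) ((List.pairwise_map).mpr hSp)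
  rw [hkeys]
  exact List.map_congr_left (fun k _ => by rw [pvSorted_filter_stable])

-- ===== VERDICT (by name: the statement is the Claim_ definition above) =====
theorem aggregate_events_by_job_spec : Claim_equal_aggregate_events_by_job := by
  intro events _
  unfold Spec_aggregate_events_by_job
  rw [pvA_eq_canon, pvB_eq_canon]
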